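/-
  jsmn_d.bin, `jsmn_parse`: what the three CALLING cases of the switch share ('{' '[' → jsmn_alloc_token, '"' → jsmn_parse_string,
  other → jsmn_parse_primitive). Everything is derived from `FrameCore` / `Frame` (Prog/Jsmn/D/ParseInv.lean). Namespace X86.J6.D.A2.
    toksBytes_congr, core_img, core_text     the image and the text are still in memory at a cut point
    core_step                                FrameCore after a call / stores: registers kept, memory changed only below the frame and in the data windows
    frame_next, r15_inc                      the end of a `.next` path: Frame from FrameCore + count++ (Inv and the count's range from SafeFacts.body)
    region_callee, env_callee                jsmn_parse's Regions / Env are the callee's (its 24-byte stack window lies inside jsmn_parse's 88)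
    toks_frame, toksArg_frame                the token array through stores elsewhere
    tokUpd_nat, holds32_inc, bump_tokens     `tokens[toksuper].size++` as compiled = the model's `tokUpd`
    bumpSuper_m1, bumpSuper_some
-/
import Prog.Jsmn.D.ParseInv

namespace X86
namespace J6
namespace D
namespace A2
open X86.User (CodeAt RegsKept Span FlagsOK Layout toNat_add_ofNat toNat_ofNat_lt' add_ofNat_add)
open Jsmn JsmnDBytes

set_option maxRecDepth 100000
set_option maxHeartbeats 4000000
set_option linter.unusedSimpArgs false
set_option linter.unusedVariables false

/-- The size of the token array depends only on whether there is one. -/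
theorem toksBytes_congr {cfg : Jsmn.Config} {k : Nat} {a b : Option Tokens} (h : a = none ↔ b = none) : toksBytes cfg k a = toksBytes cfg k b := by
  cases a <;> cases b <;> simp_all [toksBytes]

variable {c : PCtx} {n : User.Layout} {v0 v : User.State} {p : Parser} {toks : Option Tokens}

/-- The image is still in memory at every cut point. -/
theorem core_img (h : FrameCore c n v0 v p toks) : CodeAt v.mem 0x100000 image_bytes := by
  have hp := h.entry.pre
  have hW := hp.toksW
  v3_open hp.call hp.env.parserR hW h.same
  unfold PCtx.tlen dataWins at h_same
  j6_bin
  v3_frame hp_call_img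

/-- The text is still in memory at every cut point. -/
theorem core_text (h : FrameCore c n v0 v p toks) : CodeAt v.mem c.jsA c.js := by
  have hp := h.entry.pre
  have htext := hp.text
  have hjs := hp.jslt
  have hW := hp.toksW
  v3_open hp.call hp.env hW h.same
  unfold PCtx.tlen dataWins at h_same
  j6_bin
  v3_frame htext

/-- **A step inside the loop body keeps the frame**: the five registers that hold the arguments are the same, memory changed only below the frame
(the callee's stack window and the return address pushed by the `call`) and in the two data windows; the new parser / tokens are given. -/
theorem core_step {v' : User.State} {p' : Parser} {toks' : Option Tokens} (h : FrameCore c n v0 v p toks)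
    (hrsp : v'.reg .rsp = v.reg .rsp) (hrbp : v'.reg .rbp = v.reg .rbp) (hr14 : v'.reg .r14 = v.reg .r14) (hr13 : v'.reg .r13 = v.reg .r13)
    (hr12 : v'.reg .r12 = v.reg .r12)
    (hsame : SameOutside v.mem v'.mem (((v0.reg .rsp).toNat - 88, (v0.reg .rsp).toNat - 56) :: dataWins c.pa c.tb c.tlen))
    (hparser : ParserAt v'.mem c.pa p') (htoks : ToksArg Config.default v'.mem c.tb c.numTokens toks') (hnull : toks' = none ↔ toks = none) :
    FrameCore c n v0 v' p' toks' := by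
  have hp := h.entry.pre
  have hs0 := h.same
  have hW := hp.toksW
  v3_open hp.call hp.env.parserR hW
  unfold PCtx.tlen dataWins at hsame hs0
  j6_bin
  have h1 := h.ntok; have h2 := h.sv15; have h3 := h.sv14; have h4 := h.sv13; have h5 := h.sv12; have h6 := h.svbp; have h7 := h.svbx
  have h8 := h.retA
  refine ⟨h.entry, hrsp.trans h.rsp, hrbp.trans h.rbp, hr14.trans h.r14, hr13.trans h.r13, hr12.trans h.r12, by v3_frame h1, by v3_frame h2,
    by v3_frame h3, by v3_frame h4, by v3_frame h5, by v3_frame h6, by v3_frame h7, by v3_frame h8, ?_, hparser, htoks, hnull.trans h.null⟩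
  unfold PCtx.tlen dataWins
  refine hs0.trans (hsame.mono ?_)
  intro a ha
  simp only [outside_cons, outside_nil, and_true] at ha ⊢
  omega

/-- `count++` in r15d. -/
theorem r15_inc (x : Int) : Word.low .w32 (UInt64.ofNat (u32 x) + 1) = UInt64.ofNat (u32 (i32 (x + 1))) := by
  have := u32_lt x
  have h2 : u32 (i32 (x + 1)) = (u32 x + 1) % 4294967296 := by unfold u32 i32; omega
  rw [h2]
  apply UInt64.toNat_inj.mp
  v3_omega

/-- **The end of a `.next` path**: `Frame` for the model's next state from its `FrameCore` and the count register; the invariant and the range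
of the count come from `SafeFacts.body`. -/
theorem frame_next {v' : User.State} {s s' : St} {fuel : Nat} {ch : UInt8} (sf : SafeFacts Config.default) (hfr : Frame c n v0 v s)
    (hb : body Config.default c.js fuel c.numTokens s ch = some (.next s')) (hcore : FrameCore c n v0 v' s'.p s'.toks)
    (hr15 : v'.reg .r15 = UInt64.ofNat (u32 s'.count)) : Frame c n v0 v' s' := by
  obtain ⟨hi, hc, _⟩ := (sf.body c.js fuel c.numTokens s ch hfr.inv hfr.cnt).1 s' hb
  exact ⟨hcore, hr15, hc, hi⟩

/-- A data region of jsmn_parse is a data region of a function it calls (whose stack window, at most 24 bytes, lies inside jsmn_parse's 88). -/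
theorem region_callee {b : Bin} {v1 : User.State} {use : Nat} {a : Word} {len : Nat} (h : Region b n v0 88 a len)
    (hrsp : v1.reg .rsp = v0.reg .rsp - 64) (hsp : 88 ≤ (v0.reg .rsp).toNat) (huse : use ≤ 24) : Region b n v1 use a len := by
  refine ⟨h.lo, h.hi, h.img, ?_⟩
  have := h.stk
  rw [hrsp]
  v3_omega

/-- The three buffers, as the callee sees them. -/
theorem env_callee {b : Bin} {v1 : User.State} {use : Nat} {pa jsA tb : Word} {len tlen : Nat} (h : Env b n v0 88 pa jsA len tb tlen)
    (hrsp : v1.reg .rsp = v0.reg .rsp - 64) (hsp : 88 ≤ (v0.reg .rsp).toNat) (huse : use ≤ 24) : Env b n v1 use pa jsA len tb tlen :=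
  ⟨region_callee h.parserR hrsp hsp huse, region_callee h.jsR hrsp hsp huse, h.toksR.imp_right fun hR => region_callee hR hrsp hsp huse, h.parserJs, h.parserToks,
    h.jsToks⟩

/-- The token array (16-byte records, `k` of them) through stores elsewhere: `A2.toks_frame h hlen (by v3_eqon) (by v3_omega)`. -/
theorem toks_frame {μ ν : User.Mem} {tb : Word} {ts : Tokens} {k : Nat} (h : TokensAt Config.default μ tb ts) (hl : ts.length = k)
    (he : User.Mem.EqOn tb.toNat (tb.toNat + 16 * k) μ ν) (hlt : tb.toNat + 16 * k < 2 ^ 64) : TokensAt Config.default ν tb ts :=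
  h.frame (by rw [tokSize_default, hl]; exact he) (by rw [tokSize_default, hl]; exact hlt)

/-- The `tokens` argument (NULL, or the array) through stores elsewhere. -/
theorem toksArg_frame {μ ν : User.Mem} {tb : Word} {k : Nat} {toks : Option Tokens} (h : ToksArg Config.default μ tb k toks)
    (he : User.Mem.EqOn tb.toNat (tb.toNat + toksBytes Config.default k toks) μ ν) (hlt : tb.toNat + toksBytes Config.default k toks < 2 ^ 64) :
    ToksArg Config.default ν tb k toks := by
  cases toks with
  | none => exact h
  | some ts => exact ⟨h.1, h.2.1, toks_frame h.2.2 h.2.1 he hlt⟩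

/-- `tokens[j]` updated, for a natural index. -/
theorem tokUpd_nat (ts : Tokens) (j : Nat) (f : Token → Token) : tokUpd ts (j : Int) f = ts.set j (f (ts.getD j default)) := by
  unfold tokUpd tokAt
  have : ¬ ((j : Int) < 0) := by omega
  simp [this]

/-- An `int` field incremented by `mov esi,[..] ; lea edx,[rsi+1] ; mov [..],edx`. -/
theorem holds32_inc (x : Int) : Holds32 (Word.low .w32 (UInt64.ofNat (u32 x) + 1)).toNat (i32 (x + 1)) := by
  rw [r15_inc]
  have h := u32_lt (i32 (x + 1))
  have e : (UInt64.ofNat (u32 (i32 (x + 1)))).toNat = u32 (i32 (x + 1)) := by v3_omega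
  rw [e]
  exact holds32_of_range _ (i32_range _).1 (i32_range _).2

/-- The same, as `v3_read` reads the stored value back (`% 256 ^ 4`). -/
theorem holds32_inc_mod (x : Int) : Holds32 ((Word.low .w32 (UInt64.ofNat (u32 x) + 1)).toNat % 256 ^ 4) (i32 (x + 1)) := by
  have h : (Word.low .w32 (UInt64.ofNat (u32 x) + 1)).toNat < 4294967296 := by v3_omega
  rw [Nat.mod_eq_of_lt (by simpa using h)]
  exact holds32_inc x

/-- **`tokens[j].size++`** as the three cases compile it (`movsxd / cdqe ; shl 4 ; add r12 ; mov esi,[+12] ; lea ; mov [+12]`): the array afterwards is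
the model's `tokUpd`. -/
theorem bump_tokens {μ : User.Mem} {tb : Word} {ts : Tokens} {j k : Nat} (h : TokensAt Config.default μ tb ts) (hl : ts.length = k) (hj : j < k)
    (hlt : tb.toNat + 16 * k < 2 ^ 64) :
    TokensAt Config.default
      (μ.writeLE (UInt64.ofNat (16 * j) + tb + 12) 4 (Word.low .w32 (UInt64.ofNat (μ.readLE (UInt64.ofNat (16 * j) + tb + 12) 4) + 1)).toNat) tb
      (tokUpd ts (j : Int) fun t => { t with size := i32 (t.size + 1) }) := by
  rw [tokUpd_nat]
  have hjl : j < ts.length := hl ▸ hj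
  have hmul := tokSize_mul_le Config.default hjl
  rw [tokSize_default] at hmul
  have ht0 := h.getD j hjl
  have haddr : tokAddr Config.default tb j = UInt64.ofNat (16 * j) + tb := by
    unfold tokAddr; rw [tokSize_default]; exact UInt64.add_comm _ _
  refine TokensAt.update h hjl (by rw [tokSize_default, hl]; exact hlt) (by rw [tokSize_default]; v3_eqon) (by rw [tokSize_default, hl]; v3_eqon) ?_
  rw [haddr] at ht0 ⊢
  obtain ⟨hraw, hlo, hhi⟩ := ht0.size
  have ht := ht0.type
  have hs := ht0.start
  have he := ht0.end
  refine ⟨by v3_frame ht, by v3_frame hs, by v3_frame he, holds32_read (by v3_read) ?_, fun h => absurd h (by decide)⟩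
  rw [hraw]
  exact holds32_inc_mod _

/-- `bumpSuper` without a superior token. -/
theorem bumpSuper_m1 {p : Parser} {toks : Option Tokens} (h : p.toksuper = -1) : bumpSuper p toks = toks := by
  cases toks <;> simp [bumpSuper, h]

/-- `bumpSuper` with the superior token `j`. -/
theorem bumpSuper_some {p : Parser} {ts : Tokens} {j : Nat} (h : p.toksuper = j) :
    bumpSuper p (some ts) = some (tokUpd ts (j : Int) fun t => { t with size := i32 (t.size + 1) }) := by
  have : ¬ ((j : Int) = -1) := by omega
  simp [bumpSuper, h, this]

end A2
end D
end J6
end X86
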